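-- pv_equiv track=rewrite | github.com/jazy510/noncoding3torus | UTILS.py | ascii_to_base
-- ===== SOURCE A (Python) =====
-- def ascii_to_base(inputstring):
--     '''
--         Convert an ascii string to a sequence of Bases.
--         A = 00
--         C = 01
--         G = 10
--         T = 11
--
--         Pad front with Zeros
--     '''
--     retstring = ''
--     for x in inputstring:
--         the_bin = bin(ord(x))[2:] # Binary string
--         the_bin = '0'* ( 8 - (len(the_bin) %8)) + the_bin
--         for y in range(0, 4):
--             if the_bin[2*y:2*y+2] == '00':
--                 retstring += 'A'
--             elif the_bin[2*y:2*y+2] == '01':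
--                 retstring += 'C'
--             elif the_bin[2*y:2*y+2] == '10':
--                 retstring += 'G'
--             elif the_bin[2*y:2*y+2] == '11':
--                 retstring += 'T'
--     return retstring
-- ===== SOURCE B (Python) =====
-- def ascii_to_base(inputstring):
--     return ''.join('ACGT'[(ord(x) >> (6 - 2 * k)) & 3]
--                    for x in inputstring for k in range(4))
-- ===== Notes on version B (the rewrite author's own statement) =====
-- stated objective: idiomatic
-- what changed: B drops the binary-string construction, front-padding and if/elif slice ladder entirely and instead extracts the four base-4 digits of each character's code arithmetically (shift and mask) and indexes them into the base alphabet.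
import Mathlib
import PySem

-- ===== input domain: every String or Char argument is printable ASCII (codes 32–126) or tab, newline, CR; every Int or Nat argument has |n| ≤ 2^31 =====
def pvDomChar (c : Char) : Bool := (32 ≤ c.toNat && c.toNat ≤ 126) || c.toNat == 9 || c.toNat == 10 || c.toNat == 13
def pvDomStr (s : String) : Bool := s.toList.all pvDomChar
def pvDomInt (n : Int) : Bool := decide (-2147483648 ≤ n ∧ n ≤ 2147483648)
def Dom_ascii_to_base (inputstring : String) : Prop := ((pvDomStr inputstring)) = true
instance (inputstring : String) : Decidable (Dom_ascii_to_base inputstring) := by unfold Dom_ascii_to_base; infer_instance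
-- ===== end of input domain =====

-- B replaces A's binary-string building and if/elif slice ladder by arithmetic base-4
-- digit extraction (shift/mask into 'ACGT'); return values agree on the ASCII domain.
-- Both ports accumulate a List Char and wrap with String.mk at the end (Python string concat).

-- ===== PORT A =====
-- bin(n)[2:] for n > 0, as a fuel recursion (fuel = n suffices since n/2 < n)
def pvBinDigitsAux : Nat → Nat → List Char
  | _, 0 => []
  | 0, _ => []
  | fuel+1, n => pvBinDigitsAux fuel (n / 2) ++ [if n % 2 = 1 then '1' else '0']

def pvBinDigits (n : Nat) : List Char := pvBinDigitsAux n n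

-- body of A's inner 'for y in range(0, 4)' loop (the_bin[2*y:2*y+2] if/elif ladder)
def pvInnerStep (theBin : List Char) (r : List Char) (y : Nat) : List Char :=
  let p := (theBin.drop (2 * y)).take 2
  if p = ['0', '0'] then r ++ ['A']
  else if p = ['0', '1'] then r ++ ['C']
  else if p = ['1', '0'] then r ++ ['G']
  else if p = ['1', '1'] then r ++ ['T']
  else r

-- body of A's outer 'for x in inputstring' loop, on n = ord(x)
def pvEncodeA (n : Nat) (retstring : List Char) : List Char :=
  let theBin0 := if n = 0 then ['0'] else pvBinDigits n
  let theBin := List.replicate (8 - theBin0.length % 8) '0' ++ theBin0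
  (List.range 4).foldl (pvInnerStep theBin) retstring

def ascii_to_base (inputstring : String) : String :=
  String.mk (inputstring.toList.foldl (fun retstring x => pvEncodeA x.toNat retstring) [])

-- ===== PORT B =====
def ascii_to_base_alt (inputstring : String) : String :=
  String.mk <|
    inputstring.toList.flatMap (fun x =>
      (List.range 4).map (fun k => ['A', 'C', 'G', 'T'].getD ((x.toNat >>> (6 - 2 * k)) &&& 3) ' '))

-- ===== PRECONDITION & SPEC =====
def Spec_ascii_to_base (inputstring : String) (out : String) : Prop := out = ascii_to_base_alt inputstring
instance (inputstring : String) (out : String) : Decidable (Spec_ascii_to_base inputstring out) := by unfold Spec_ascii_to_base; infer_instance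

-- ===== CLAIM (what is proved, stated in full; the proofs are below) =====
def Claim_equal_ascii_to_base : Prop := ∀ (inputstring : String), Dom_ascii_to_base inputstring → Spec_ascii_to_base inputstring (ascii_to_base inputstring)

-- ===== LEMMAS AND PROOFS =====

-- B's per-character encoding
def pvEncB (n : Nat) : List Char :=
  (List.range 4).map (fun k => ['A', 'C', 'G', 'T'].getD ((n >>> (6 - 2 * k)) &&& 3) ' ')

theorem pvInnerStep_shift (b r : List Char) (y : Nat) :
    pvInnerStep b r y = r ++ pvInnerStep b [] y := by
  simp only [pvInnerStep]; split_ifs <;> simp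

theorem pvInnerFold_shift (b : List Char) (ys : List Nat) : ∀ acc : List Char,
    ys.foldl (pvInnerStep b) acc = acc ++ ys.foldl (pvInnerStep b) [] := by
  induction ys with
  | nil => intro acc; simp
  | cons y ys ih =>
    intro acc
    rw [List.foldl_cons, List.foldl_cons, ih (pvInnerStep b acc y), ih (pvInnerStep b [] y),
      pvInnerStep_shift b acc y, List.append_assoc]

theorem pvEncodeA_shift (n : Nat) (acc : List Char) :
    pvEncodeA n acc = acc ++ pvEncodeA n [] := by
  unfold pvEncodeA; exact pvInnerFold_shift _ _ acc

-- the two per-character encodings agree on every code below 128 (in particular on Dom)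
theorem pvEnc_eq : ∀ n, n < 128 → pvEncodeA n [] = pvEncB n := by decide

theorem pvOuter (l : List Char) (h : ∀ c ∈ l, pvDomChar c = true) : ∀ acc : List Char,
    l.foldl (fun retstring x => pvEncodeA x.toNat retstring) acc
    = acc ++ l.flatMap (fun x => pvEncB x.toNat) := by
  induction l with
  | nil => intro acc; simp
  | cons c cs ih =>
    intro acc
    have hc : pvDomChar c = true := h c (by simp)
    have hlt : c.toNat < 128 := by
      simp only [pvDomChar, Bool.or_eq_true, Bool.and_eq_true, decide_eq_true_eq,
        beq_iff_eq] at hc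
      omega
    rw [List.foldl_cons, pvEncodeA_shift, pvEnc_eq c.toNat hlt,
      ih (fun d hd => h d (by simp [hd])), List.flatMap_cons, List.append_assoc]

-- ===== VERDICT (by name: the statement is the Claim_ definition above) =====
theorem ascii_to_base_spec : Claim_equal_ascii_to_base := by
  intro s hdom
  unfold Spec_ascii_to_base ascii_to_base ascii_to_base_alt
  have h : ∀ c ∈ s.toList, pvDomChar c = true := by
    simpa [Dom_ascii_to_base, pvDomStr, List.all_eq_true] using hdom
  rw [pvOuter s.toList h []]
  rfl
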